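-- pv_equiv track=rewrite | github.com/MadGapun/PBP | src/bewerbungs_assistent/export.py | _top_recommendations
-- ===== SOURCE A (Python) =====
-- def _top_recommendations(pb, ats, rec):
--     """Extract top recommendations across all perspectives, prioritized.
--
--     Sortiert nach Wichtigkeit: ATS-Blocker > Recruiter-Concerns > Personalberater-Tipps.
--     Markiert kritische Empfehlungen (KRITISCH) als hohe Prioritaet.
--     """
--     recs = []
--     # ATS recommendations first (most critical for getting past the filter)
--     for r in ats.get("empfehlungen", []):
--         prio = "kritisch" if "KRITISCH" in r else "hoch"
--         recs.append({"perspektive": "ATS", "empfehlung": r, "prioritaet": prio})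
--     for r in rec.get("empfehlungen", []):
--         recs.append({"perspektive": "Recruiter", "empfehlung": r, "prioritaet": "mittel"})
--     for r in pb.get("empfehlungen", []):
--         # Career gaps and missing summary are high priority
--         prio = "hoch" if any(kw in r.lower() for kw in ("luecken", "fehlt", "komplett")) else "mittel"
--         recs.append({"perspektive": "Personalberater", "empfehlung": r, "prioritaet": prio})
--
--     # Sort: kritisch > hoch > mittel
--     prio_order = {"kritisch": 0, "hoch": 1, "mittel": 2}
--     recs.sort(key=lambda x: prio_order.get(x["prioritaet"], 2))
--     return recs[:8]
-- ===== SOURCE B (Python) =====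
-- def _top_recommendations(pb, ats, rec):
--     """Bucket by priority while visiting sources in order; no sort needed.
--
--     Appending into per-priority buckets in the same visit order reproduces
--     the stable sort's output, then kritisch + hoch + mittel is already sorted.
--     """
--     kritisch, hoch, mittel = [], [], []
--     buckets = {"kritisch": kritisch, "hoch": hoch, "mittel": mittel}
--     for r in ats.get("empfehlungen", []):
--         prio = "kritisch" if "KRITISCH" in r else "hoch"
--         buckets[prio].append({"perspektive": "ATS", "empfehlung": r, "prioritaet": prio})
--     for r in rec.get("empfehlungen", []):
--         mittel.append({"perspektive": "Recruiter", "empfehlung": r, "prioritaet": "mittel"})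
--     for r in pb.get("empfehlungen", []):
--         prio = "hoch" if any(kw in r.lower() for kw in ("luecken", "fehlt", "komplett")) else "mittel"
--         buckets[prio].append({"perspektive": "Personalberater", "empfehlung": r, "prioritaet": prio})
--     return (kritisch + hoch + mittel)[:8]
-- ===== Notes on version B (the rewrite author's own statement) =====
-- stated objective: simpler
-- what changed: Replaces the flat list plus comparison sort keyed through a priority dict with three per-priority buckets filled in visit order and concatenated, so no sort or key lookup is needed.
import Mathlib
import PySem

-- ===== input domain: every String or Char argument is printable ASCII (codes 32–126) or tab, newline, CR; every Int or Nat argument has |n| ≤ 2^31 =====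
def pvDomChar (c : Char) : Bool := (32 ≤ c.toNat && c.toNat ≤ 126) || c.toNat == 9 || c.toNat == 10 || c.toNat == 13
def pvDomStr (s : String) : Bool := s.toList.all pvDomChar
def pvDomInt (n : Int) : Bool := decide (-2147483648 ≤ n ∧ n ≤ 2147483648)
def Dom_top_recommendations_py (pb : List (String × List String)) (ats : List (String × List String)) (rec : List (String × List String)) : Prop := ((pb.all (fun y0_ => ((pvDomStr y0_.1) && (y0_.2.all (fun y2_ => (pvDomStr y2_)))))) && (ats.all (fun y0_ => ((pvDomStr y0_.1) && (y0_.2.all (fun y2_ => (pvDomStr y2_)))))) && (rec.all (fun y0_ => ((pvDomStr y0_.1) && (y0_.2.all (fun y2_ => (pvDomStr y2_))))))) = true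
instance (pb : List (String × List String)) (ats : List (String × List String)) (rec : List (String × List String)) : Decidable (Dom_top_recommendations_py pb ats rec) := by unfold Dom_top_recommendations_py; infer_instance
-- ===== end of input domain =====

-- B replaces A's flat list + stable sort by three per-priority buckets filled in
-- visit order and concatenated (objective: simpler; return value only, no mutation).

-- shared helpers: d.get("empfehlungen", []), the dict literal appended for one
-- recommendation, and the two priority expressions (identical in both Pythons)
def pvGetEmpf (d : List (String × List String)) : List String :=
  PySem.Dict.getD (PySem.Dict.mk d) "empfehlungen" []

def pvItem (persp r prio : String) : List (String × String) :=
  [("perspektive", persp), ("empfehlung", r), ("prioritaet", prio)]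

def pvPrioA (r : String) : String :=
  if PySem.Str.isIn "KRITISCH" r then "kritisch" else "hoch"

def pvPrioP (r : String) : String :=
  if PySem.Str.isIn "luecken" (PySem.Str.lower r) || PySem.Str.isIn "fehlt" (PySem.Str.lower r)
      || PySem.Str.isIn "komplett" (PySem.Str.lower r) then "hoch" else "mittel"

-- ===== PORT A =====
def pvPrioOrder : PySem.Dict String Int :=
  PySem.Dict.ofList [("kritisch", 0), ("hoch", 1), ("mittel", 2)]

-- sort key: prio_order.get(x["prioritaet"], 2); every element of recs carries the
-- key "prioritaet", so reading it with default "" is exact here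
def pvKey (x : List (String × String)) : Int :=
  PySem.Dict.getD pvPrioOrder (PySem.Dict.getD (PySem.Dict.mk x) "prioritaet" "") 2

def top_recommendations_py (pb : List (String × List String)) (ats : List (String × List String)) (rec : List (String × List String)) : List (List (String × String)) :=
  let recs1 := (pvGetEmpf ats).foldl (fun acc r => acc ++ [pvItem "ATS" r (pvPrioA r)]) []
  let recs2 := (pvGetEmpf rec).foldl (fun acc r => acc ++ [pvItem "Recruiter" r "mittel"]) recs1
  let recs3 := (pvGetEmpf pb).foldl (fun acc r => acc ++ [pvItem "Personalberater" r (pvPrioP r)]) recs2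
  PySem.List.slice (PySem.List.sorted recs3 pvKey) none (some 8)

-- ===== PORT B =====
-- buckets[prio].append(item) on the triple (kritisch, hoch, mittel)
def pvBucketAppend
    (b : List (List (String × String)) × List (List (String × String)) × List (List (String × String)))
    (prio : String) (item : List (String × String)) :
    List (List (String × String)) × List (List (String × String)) × List (List (String × String)) :=
  if prio == "kritisch" then (b.1 ++ [item], b.2.1, b.2.2)
  else if prio == "hoch" then (b.1, b.2.1 ++ [item], b.2.2)
  else (b.1, b.2.1, b.2.2 ++ [item])

def top_recommendations_py_alt (pb : List (String × List String)) (ats : List (String × List String)) (rec : List (String × List String)) : List (List (String × String)) :=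
  let b1 := (pvGetEmpf ats).foldl
    (fun b r => pvBucketAppend b (pvPrioA r) (pvItem "ATS" r (pvPrioA r))) ([], [], [])
  let b2 := (pvGetEmpf rec).foldl
    (fun b r => (b.1, b.2.1, b.2.2 ++ [pvItem "Recruiter" r "mittel"])) b1
  let b3 := (pvGetEmpf pb).foldl
    (fun b r => pvBucketAppend b (pvPrioP r) (pvItem "Personalberater" r (pvPrioP r))) b2
  (b3.1 ++ b3.2.1 ++ b3.2.2).take 8

-- ===== PRECONDITION & SPEC =====
def Spec_top_recommendations_py (pb : List (String × List String)) (ats : List (String × List String)) (rec : List (String × List String)) (out : List (List (String × String))) : Prop := out = top_recommendations_py_alt pb ats rec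
instance (pb : List (String × List String)) (ats : List (String × List String)) (rec : List (String × List String)) (out : List (List (String × String))) : Decidable (Spec_top_recommendations_py pb ats rec out) := by unfold Spec_top_recommendations_py; infer_instance

-- ===== CLAIM (what is proved, stated in full; the proofs are below) =====
def Claim_equal_top_recommendations_py : Prop := ∀ (pb : List (String × List String)) (ats : List (String × List String)) (rec : List (String × List String)), Dom_top_recommendations_py pb ats rec → Spec_top_recommendations_py pb ats rec (top_recommendations_py pb ats rec)

-- ===== LEMMAS AND PROOFS =====

theorem pv_foldl_app {α β : Type} (f : α → β) (l : List α) (acc : List β) :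
    l.foldl (fun a r => a ++ [f r]) acc = acc ++ l.map f := by
  induction l generalizing acc with
  | nil => simp
  | cons x xs ih => simp [ih]

theorem pv_insertBy_cons {α : Type} (before : α → α → Bool) (x y : α) (ys : List α) :
    PySem.List.insertBy before x (y :: ys) =
      if before x y then x :: y :: ys else y :: PySem.List.insertBy before x ys := rfl

theorem pv_insertBy_skip {α : Type} (before : α → α → Bool) (x : α) (ys zs : List α)
    (h : ∀ y ∈ ys, before x y = false) :
    PySem.List.insertBy before x (ys ++ zs) = ys ++ PySem.List.insertBy before x zs := by
  induction ys with
  | nil => simp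
  | cons y t ih =>
    have hy : before x y = false := h y (by simp)
    simp [pv_insertBy_cons, hy, ih (fun a ha => h a (by simp [ha]))]

theorem pv_insertBy_front {α : Type} (before : α → α → Bool) (x : α) (ws : List α)
    (h : ∀ w ∈ ws, before x w = true) :
    PySem.List.insertBy before x ws = x :: ws := by
  cases ws with
  | nil => rfl
  | cons w t => simp [pv_insertBy_cons, h w (by simp)]

-- inserting an element with key j ∈ {0,1,2} into the bucketed list appends it to bucket j
theorem pv_insert3 {α : Type} (key : α → Int) (x : α) (A0 A1 A2 : List α)
    (h0 : ∀ a ∈ A0, key a = 0) (h1 : ∀ a ∈ A1, key a = 1) (h2 : ∀ a ∈ A2, key a = 2)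
    (hx : key x = 0 ∨ key x = 1 ∨ key x = 2) :
    PySem.List.insertBy (fun a b => decide (key a < key b)) x (A0 ++ A1 ++ A2) =
      (if key x = 0 then (A0 ++ [x]) ++ A1 ++ A2
       else if key x = 1 then A0 ++ (A1 ++ [x]) ++ A2
       else A0 ++ A1 ++ (A2 ++ [x])) := by
  rcases hx with hx | hx | hx
  · rw [List.append_assoc, pv_insertBy_skip _ _ A0 (A1 ++ A2)
      (by intro y hy; simp [h0 y hy, hx]),
      pv_insertBy_front _ _ (A1 ++ A2)
      (by intro w hw
          rcases List.mem_append.1 hw with h | h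
          · simp [hx, h1 w h]
          · simp [hx, h2 w h])]
    simp [hx]
  · rw [pv_insertBy_skip _ _ (A0 ++ A1) A2
      (by intro y hy
          rcases List.mem_append.1 hy with h | h
          · simp [hx, h0 y h]
          · simp [hx, h1 y h]),
      pv_insertBy_front _ _ A2 (by intro w hw; simp [hx, h2 w hw])]
    simp [hx]
  · rw [List.append_assoc, pv_insertBy_skip _ _ A0 (A1 ++ A2)
      (by intro y hy; simp [h0 y hy, hx]),
      pv_insertBy_skip _ _ A1 A2 (by intro y hy; simp [h1 y hy, hx]),
      PySem.List.insertBy_of_forall_not_before _ _ A2 (by intro y hy; simp [h2 y hy, hx])]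
    simp [hx]

theorem pv_foldl3 {α : Type} (key : α → Int) (xs : List α) :
    ∀ (A0 A1 A2 : List α),
    (∀ a ∈ A0, key a = 0) → (∀ a ∈ A1, key a = 1) → (∀ a ∈ A2, key a = 2) →
    (∀ x ∈ xs, key x = 0 ∨ key x = 1 ∨ key x = 2) →
    xs.foldl (fun acc x => PySem.List.insertBy (fun a b => decide (key a < key b)) x acc)
      (A0 ++ A1 ++ A2) =
      (A0 ++ xs.filter (fun x => key x == 0)) ++ (A1 ++ xs.filter (fun x => key x == 1))
        ++ (A2 ++ xs.filter (fun x => key x == 2)) := by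
  induction xs with
  | nil => intro A0 A1 A2 _ _ _ _; simp
  | cons x xs ih =>
    intro A0 A1 A2 h0 h1 h2 hx
    have hxk := hx x (by simp)
    rw [List.foldl_cons, pv_insert3 key x A0 A1 A2 h0 h1 h2 hxk]
    rcases hxk with hk | hk | hk
    · rw [if_pos hk,
        ih (A0 ++ [x]) A1 A2
          (by intro a ha; rcases List.mem_append.1 ha with h | h
              · exact h0 a h
              · simp at h; simp [h, hk])
          h1 h2 (fun y hy => hx y (by simp [hy]))]
      simp [hk]
    · rw [if_neg (by omega), if_pos hk,
        ih A0 (A1 ++ [x]) A2 h0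
          (by intro a ha; rcases List.mem_append.1 ha with h | h
              · exact h1 a h
              · simp at h; simp [h, hk])
          h2 (fun y hy => hx y (by simp [hy]))]
      simp [hk]
    · rw [if_neg (by omega), if_neg (by omega),
        ih A0 A1 (A2 ++ [x]) h0 h1
          (by intro a ha; rcases List.mem_append.1 ha with h | h
              · exact h2 a h
              · simp at h; simp [h, hk])
          (fun y hy => hx y (by simp [hy]))]
      simp [hk]

-- a stable sort of a list whose keys lie in {0,1,2} is its three filters concatenated
theorem pv_sorted3 {α : Type} (key : α → Int) (xs : List α)
    (hx : ∀ x ∈ xs, key x = 0 ∨ key x = 1 ∨ key x = 2) :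
    PySem.List.sorted xs key =
      xs.filter (fun x => key x == 0) ++ xs.filter (fun x => key x == 1)
        ++ xs.filter (fun x => key x == 2) := by
  rw [PySem.List.sorted_eq_foldl_insertBy]
  have := pv_foldl3 key xs [] [] [] (by simp) (by simp) (by simp) hx
  simpa using this

theorem pv_key_item (p r q : String) :
    pvKey (pvItem p r q) = PySem.Dict.getD pvPrioOrder q 2 := by
  simp [pvKey, pvItem, PySem.Dict.getD_eq_get?_getD, PySem.Dict.get?_mk_cons]

theorem pv_keyA (r : String) : pvKey (pvItem "ATS" r (pvPrioA r)) =
    if PySem.Str.isIn "KRITISCH" r then 0 else 1 := by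
  rw [pv_key_item]; unfold pvPrioA; split <;> decide

theorem pv_keyR (r : String) : pvKey (pvItem "Recruiter" r "mittel") = 2 := by
  rw [pv_key_item]; decide

theorem pv_keyP (r : String) : pvKey (pvItem "Personalberater" r (pvPrioP r)) =
    if PySem.Str.isIn "luecken" (PySem.Str.lower r) || PySem.Str.isIn "fehlt" (PySem.Str.lower r)
      || PySem.Str.isIn "komplett" (PySem.Str.lower r) then 1 else 2 := by
  rw [pv_key_item]; unfold pvPrioP; split <;> decide

-- B's three loops, in closed form
theorem pvPrioA_pos (r : String) (h : PySem.Str.isIn "KRITISCH" r = true) :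
    pvPrioA r = "kritisch" := by rw [pvPrioA, if_pos h]

theorem pvPrioA_neg (r : String) (h : PySem.Str.isIn "KRITISCH" r = false) :
    pvPrioA r = "hoch" := by rw [pvPrioA, if_neg (by rw [h]; simp)]

theorem pvPrioP_pos (r : String)
    (h : (PySem.Str.isIn "luecken" (PySem.Str.lower r) || PySem.Str.isIn "fehlt" (PySem.Str.lower r) || PySem.Str.isIn "komplett" (PySem.Str.lower r)) = true) :
    pvPrioP r = "hoch" := by rw [pvPrioP, if_pos h]

theorem pvPrioP_neg (r : String)
    (h : (PySem.Str.isIn "luecken" (PySem.Str.lower r) || PySem.Str.isIn "fehlt" (PySem.Str.lower r) || PySem.Str.isIn "komplett" (PySem.Str.lower r)) = false) :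
    pvPrioP r = "mittel" := by rw [pvPrioP, if_neg (by rw [h]; simp)]

theorem pvBucketAppend_k (b : List (List (String × String)) × List (List (String × String)) × List (List (String × String))) (it : List (String × String)) :
    pvBucketAppend b "kritisch" it = (b.1 ++ [it], b.2.1, b.2.2) := rfl

theorem pvBucketAppend_h (b : List (List (String × String)) × List (List (String × String)) × List (List (String × String))) (it : List (String × String)) :
    pvBucketAppend b "hoch" it = (b.1, b.2.1 ++ [it], b.2.2) := rfl

theorem pvBucketAppend_m (b : List (List (String × String)) × List (List (String × String)) × List (List (String × String))) (it : List (String × String)) :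
    pvBucketAppend b "mittel" it = (b.1, b.2.1, b.2.2 ++ [it]) := rfl

theorem pv_loopA (l : List String) :
    ∀ (k h m : List (List (String × String))),
    l.foldl (fun b r => pvBucketAppend b (pvPrioA r) (pvItem "ATS" r (pvPrioA r))) (k, h, m) =
      (k ++ (l.filter (fun r => PySem.Str.isIn "KRITISCH" r)).map (fun r => pvItem "ATS" r (pvPrioA r)),
       h ++ (l.filter (fun r => !PySem.Str.isIn "KRITISCH" r)).map (fun r => pvItem "ATS" r (pvPrioA r)),
       m) := by
  induction l with
  | nil => intro k h m; simp
  | cons r t ih =>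
    intro k h m
    simp only [List.foldl_cons]
    by_cases hr : PySem.Str.isIn "KRITISCH" r
    · rw [pvPrioA_pos r hr, pvBucketAppend_k, ih]
      have hc := hr; simp at hc
      simp [List.filter_cons, hc, pvPrioA_pos r hr]
    · have hr' : PySem.Str.isIn "KRITISCH" r = false := by simpa using hr
      rw [pvPrioA_neg r hr', pvBucketAppend_h, ih]
      have hc := hr'; simp at hc
      simp [List.filter_cons, hc, pvPrioA_neg r hr']

theorem pv_loopR (l : List String) :
    ∀ (k h m : List (List (String × String))),
    l.foldl (fun b r => (b.1, b.2.1, b.2.2 ++ [pvItem "Recruiter" r "mittel"])) (k, h, m) =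
      (k, h, m ++ l.map (fun r => pvItem "Recruiter" r "mittel")) := by
  induction l with
  | nil => intro k h m; simp
  | cons r t ih => intro k h m; simp [List.foldl_cons, ih]

theorem pv_loopP (l : List String) :
    ∀ (k h m : List (List (String × String))),
    l.foldl (fun b r => pvBucketAppend b (pvPrioP r) (pvItem "Personalberater" r (pvPrioP r))) (k, h, m) =
      (k,
       h ++ (l.filter (fun r => PySem.Str.isIn "luecken" (PySem.Str.lower r) || PySem.Str.isIn "fehlt" (PySem.Str.lower r) || PySem.Str.isIn "komplett" (PySem.Str.lower r))).map (fun r => pvItem "Personalberater" r (pvPrioP r)),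
       m ++ (l.filter (fun r => !(PySem.Str.isIn "luecken" (PySem.Str.lower r) || PySem.Str.isIn "fehlt" (PySem.Str.lower r) || PySem.Str.isIn "komplett" (PySem.Str.lower r)))).map (fun r => pvItem "Personalberater" r (pvPrioP r))) := by
  induction l with
  | nil => intro k h m; simp
  | cons r t ih =>
    intro k h m
    simp only [List.foldl_cons]
    by_cases hr : (PySem.Str.isIn "luecken" (PySem.Str.lower r) || PySem.Str.isIn "fehlt" (PySem.Str.lower r) || PySem.Str.isIn "komplett" (PySem.Str.lower r)) = true
    · rw [pvPrioP_pos r hr, pvBucketAppend_h, ih]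
      have hc := hr; simp at hc
      rcases hc with (h1 | h1) | h1 <;> simp [List.filter_cons, h1, pvPrioP_pos r hr]
    · have hr' : (PySem.Str.isIn "luecken" (PySem.Str.lower r) || PySem.Str.isIn "fehlt" (PySem.Str.lower r) || PySem.Str.isIn "komplett" (PySem.Str.lower r)) = false := by simpa using hr
      rw [pvPrioP_neg r hr', pvBucketAppend_m, ih]
      have hc := hr'; simp at hc
      obtain ⟨⟨n1, n2⟩, n3⟩ := hc
      simp [List.filter_cons, n1, n2, n3, pvPrioP_neg r hr']

-- ===== VERDICT (by name: the statement is the Claim_ definition above) =====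
theorem top_recommendations_py_spec : Claim_equal_top_recommendations_py := by
  intro pb ats rec _
  unfold Spec_top_recommendations_py top_recommendations_py top_recommendations_py_alt
  dsimp only
  set atsL := pvGetEmpf ats with hats
  set recL := pvGetEmpf rec with hrec
  set pbL := pvGetEmpf pb with hpb
  rw [pv_foldl_app, pv_foldl_app, pv_foldl_app, pv_loopA, pv_loopR, pv_loopP]
  simp only [List.nil_append]
  rw [pv_sorted3 pvKey _ (by
    intro x hx
    simp only [List.mem_append, List.mem_map] at hx
    rcases hx with (⟨r, _, rfl⟩ | ⟨r, _, rfl⟩) | ⟨r, _, rfl⟩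
    · rw [pv_keyA]; split <;> simp
    · rw [pv_keyR]; simp
    · rw [pv_keyP]; split <;> simp)]
  rw [PySem.List.slice_to _ (by norm_num)]
  have hA0 : (atsL.map (fun r => pvItem "ATS" r (pvPrioA r))).filter (fun x => pvKey x == 0)
      = (atsL.filter (fun r => PySem.Str.isIn "KRITISCH" r)).map (fun r => pvItem "ATS" r (pvPrioA r)) := by
    rw [List.filter_map]; congr 1
    apply List.filter_congr; intro r _
    simp only [Function.comp_apply, pv_keyA]
    cases h : PySem.Str.isIn "KRITISCH" r <;> simp at h <;> simp [h]
  have hA1 : (atsL.map (fun r => pvItem "ATS" r (pvPrioA r))).filter (fun x => pvKey x == 1)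
      = (atsL.filter (fun r => !PySem.Str.isIn "KRITISCH" r)).map (fun r => pvItem "ATS" r (pvPrioA r)) := by
    rw [List.filter_map]; congr 1
    apply List.filter_congr; intro r _
    simp only [Function.comp_apply, pv_keyA]
    cases h : PySem.Str.isIn "KRITISCH" r <;> simp at h <;> simp [h]
  have hA2 : (atsL.map (fun r => pvItem "ATS" r (pvPrioA r))).filter (fun x => pvKey x == 2) = [] := by
    rw [List.filter_map, List.filter_eq_nil_iff.2, List.map_nil]
    intro r _
    simp only [Function.comp_apply, pv_keyA]
    split <;> simp
  have hR : ∀ (n : Int), n ≠ 2 → (recL.map (fun r => pvItem "Recruiter" r "mittel")).filter (fun x => pvKey x == n) = [] := by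
    intro n hn
    rw [List.filter_map, List.filter_eq_nil_iff.2, List.map_nil]
    intro r _
    simp [Function.comp_apply, pv_keyR, hn.symm]
  have hR2 : (recL.map (fun r => pvItem "Recruiter" r "mittel")).filter (fun x => pvKey x == 2)
      = recL.map (fun r => pvItem "Recruiter" r "mittel") := by
    rw [List.filter_map, List.filter_eq_self.2, ]
    intro r _
    simp [Function.comp_apply, pv_keyR]
  have hP0 : (pbL.map (fun r => pvItem "Personalberater" r (pvPrioP r))).filter (fun x => pvKey x == 0) = [] := by
    rw [List.filter_map, List.filter_eq_nil_iff.2, List.map_nil]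
    intro r _
    simp only [Function.comp_apply, pv_keyP]
    split <;> simp
  have hP1 : (pbL.map (fun r => pvItem "Personalberater" r (pvPrioP r))).filter (fun x => pvKey x == 1)
      = (pbL.filter (fun r => PySem.Str.isIn "luecken" (PySem.Str.lower r) || PySem.Str.isIn "fehlt" (PySem.Str.lower r) || PySem.Str.isIn "komplett" (PySem.Str.lower r))).map (fun r => pvItem "Personalberater" r (pvPrioP r)) := by
    rw [List.filter_map]; congr 1
    apply List.filter_congr; intro r _
    simp only [Function.comp_apply, pv_keyP]
    cases h1 : PySem.Str.isIn "luecken" (PySem.Str.lower r) <;>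
      cases h2 : PySem.Str.isIn "fehlt" (PySem.Str.lower r) <;>
        cases h3 : PySem.Str.isIn "komplett" (PySem.Str.lower r) <;>
          simp at h1 h2 h3 <;> simp [h1, h2, h3]
  have hP2 : (pbL.map (fun r => pvItem "Personalberater" r (pvPrioP r))).filter (fun x => pvKey x == 2)
      = (pbL.filter (fun r => !(PySem.Str.isIn "luecken" (PySem.Str.lower r) || PySem.Str.isIn "fehlt" (PySem.Str.lower r) || PySem.Str.isIn "komplett" (PySem.Str.lower r)))).map (fun r => pvItem "Personalberater" r (pvPrioP r)) := by
    rw [List.filter_map]; congr 1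
    apply List.filter_congr; intro r _
    simp only [Function.comp_apply, pv_keyP]
    cases h1 : PySem.Str.isIn "luecken" (PySem.Str.lower r) <;>
      cases h2 : PySem.Str.isIn "fehlt" (PySem.Str.lower r) <;>
        cases h3 : PySem.Str.isIn "komplett" (PySem.Str.lower r) <;>
          simp at h1 h2 h3 <;> simp [h1, h2, h3]
  simp only [List.filter_append, hA0, hA1, hA2, hR 0 (by norm_num), hR 1 (by norm_num), hR2,
    hP0, hP1, hP2, List.nil_append, List.append_nil]
  simp [List.append_assoc]
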